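-- pv_equiv track=rewrite | github.com/rolandoquiroz/holbertonschool-machine_learning | supervised_learning/0x10-nlp_metrics/1-ngram_bleu.py | count_clip_ngram
-- ===== SOURCE A (Python) =====
-- def count_ngram(translation_u, ngram=1):
--     """
--     Function that counts n-grams in a sentence
--     """
--     tokens = zip(*[translation_u[i:] for i in range(ngram)])
--     ngrams = [" ".join(token) for token in tokens]
--
--     ngram_counter = {}
--     for n_gram in ngrams:
--         if n_gram not in ngram_counter:
--             ngram_counter[n_gram] = ngrams.count(n_gram)
--
--     return ngram_counter
--
-- def count_clip_ngram(sentence, references, ngram=1):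
--     """
--     Function that counts clipped ngrams
--     """
--     clipped = {}
--     sentence_ngrams_cntr = count_ngram(sentence, ngram)
--
--     for reference in references:
--         reference_ngrams_counter = count_ngram(reference, ngram)
--         for n_gram in reference_ngrams_counter:
--             if n_gram in clipped:
--                 clipped[n_gram] = max(reference_ngrams_counter[n_gram],
--                                       clipped[n_gram])
--             else:
--                 clipped[n_gram] = reference_ngrams_counter[n_gram]
--
--     clipped_ngrams_counter = {n_gram: min(sentence_ngrams_cntr.get(n_gram, 0),
--                               clipped.get(n_gram, 0))
--                               for n_gram in sentence_ngrams_cntr}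
--
--     return clipped_ngrams_counter
-- ===== SOURCE B (Python) =====
-- def count_clip_ngram(sentence, references, ngram=1):
--     """Count clipped n-grams without any counter merging: dedupe the
--     sentence's n-grams and, for each distinct one, count it directly in
--     the sentence and in every reference's n-gram list."""
--     if ngram < 1:
--         return {}
--
--     def ngrams(words):
--         return [" ".join(words[i:i + ngram])
--                 for i in range(len(words) - ngram + 1)]
--
--     sent = ngrams(sentence)
--     refs = [ngrams(r) for r in references]
--     out = {}
--     for g in sent:
--         if g not in out:
--             out[g] = min(sent.count(g),
--                          max((rn.count(g) for rn in refs), default=0))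
--     return out
-- ===== Notes on version B (the rewrite author's own statement) =====
-- stated objective: alternative
-- what changed: B builds no counter dictionaries at all and never merges references: it materialises each sequence's n-gram list once, dedupes the sentence n-grams in first-occurrence order, and for each distinct n-gram counts it directly in the sentence list and in each reference list, emitting min(sentence count, max reference count); A instead builds per-sequence count dicts and folds all references into one merged 'clipped' dict before intersecting with the sentence dict.
import Mathlib
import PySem

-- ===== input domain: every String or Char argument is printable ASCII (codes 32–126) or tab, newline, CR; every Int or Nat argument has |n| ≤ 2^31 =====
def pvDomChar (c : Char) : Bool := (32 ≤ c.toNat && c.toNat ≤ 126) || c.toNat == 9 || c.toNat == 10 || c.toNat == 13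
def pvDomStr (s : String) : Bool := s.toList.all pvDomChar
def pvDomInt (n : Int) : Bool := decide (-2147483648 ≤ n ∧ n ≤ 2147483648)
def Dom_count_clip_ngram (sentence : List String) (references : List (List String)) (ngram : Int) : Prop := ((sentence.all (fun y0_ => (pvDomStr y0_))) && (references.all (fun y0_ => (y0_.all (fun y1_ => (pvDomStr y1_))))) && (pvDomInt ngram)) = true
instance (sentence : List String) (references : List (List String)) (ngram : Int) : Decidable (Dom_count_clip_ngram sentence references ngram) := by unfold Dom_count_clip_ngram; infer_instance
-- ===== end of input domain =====

-- B builds no counter dicts and never merges references: it dedupes the sentence's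
-- n-grams and counts each distinct one directly in the sentence's and each
-- reference's n-gram list (objective: alternative decomposition, same cost class).

-- ===== PORT A =====
-- zip(*xss): rows until the shortest list is exhausted (exact for Python's zip of lists)
def pyZipRows (xss : List (List String)) : List (List String) :=
  if h : xss = [] ∨ xss.any List.isEmpty then []
  else xss.map (fun l => l.headD "") :: pyZipRows (xss.map List.tail)
termination_by (xss.headD []).length
decreasing_by
  simp only [not_or] at h
  obtain ⟨h1, h2⟩ := h
  rcases xss with _ | ⟨x, rest⟩
  · exact absurd rfl h1
  · have hx : x.isEmpty ≠ true := fun hh =>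
      h2 (List.any_eq_true.mpr ⟨x, List.mem_cons_self, hh⟩)
    have hx' : x ≠ [] := by simpa [List.isEmpty_iff] using hx
    have hp : 0 < x.length := List.length_pos_iff.mpr hx'
    simp [List.length_tail]
    omega

def count_ngram (translation_u : List String) (ngram : Int) : PySem.Dict String Int :=
  let tokens := pyZipRows ((PySem.List.pyRange 0 ngram 1).map
    (fun i => PySem.List.slice translation_u (some i) none))
  let ngrams := tokens.map (fun token => PySem.Str.join " " token)
  ngrams.foldl (fun d g => if d.contains g then d else d.insert g ((ngrams.count g : Int)))
    PySem.Dict.empty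

def count_clip_ngram (sentence : List String) (references : List (List String)) (ngram : Int) : List (String × Int) :=
  let sentence_ngrams_cntr := count_ngram sentence ngram
  let clipped := references.foldl (fun clipped reference =>
    let rc := count_ngram reference ngram
    rc.keys.foldl (fun cl g =>
      if cl.contains g then cl.insert g (max (rc.getD g 0) (cl.getD g 0))
      else cl.insert g (rc.getD g 0)) clipped) PySem.Dict.empty
  (sentence_ngrams_cntr.keys.foldl (fun out g =>
      out.insert g (min (sentence_ngrams_cntr.getD g 0) (clipped.getD g 0)))
    PySem.Dict.empty).items

-- ===== PORT B =====
-- all n-gram strings of a word list: joined windows words[i:i+ngram]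
def cgNgrams (ngram : Int) (words : List String) : List String :=
  (PySem.List.pyRange 0 ((words.length : Int) - ngram + 1) 1).map
    (fun i => PySem.Str.join " " (PySem.List.slice words (some i) (some (i + ngram))))

def count_clip_ngram_alt (sentence : List String) (references : List (List String)) (ngram : Int) : List (String × Int) :=
  if ngram < 1 then []
  else
    let sent := cgNgrams ngram sentence
    let refs := references.map (fun r => cgNgrams ngram r)
    (sent.foldl (fun out g =>
        if out.contains g then out
        else out.insert g (min ((sent.count g : Int))
          (refs.foldl (fun m rn => max m ((rn.count g : Int))) 0)))
      PySem.Dict.empty).items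

-- ===== PRECONDITION & SPEC =====
def Spec_count_clip_ngram (sentence : List String) (references : List (List String)) (ngram : Int) (out : List (String × Int)) : Prop := out = count_clip_ngram_alt sentence references ngram
instance (sentence : List String) (references : List (List String)) (ngram : Int) (out : List (String × Int)) : Decidable (Spec_count_clip_ngram sentence references ngram out) := by unfold Spec_count_clip_ngram; infer_instance

-- ===== CLAIM (what is proved, stated in full; the proofs are below) =====
def Claim_equal_count_clip_ngram : Prop := ∀ (sentence : List String) (references : List (List String)) (ngram : Int), Dom_count_clip_ngram sentence references ngram → Spec_count_clip_ngram sentence references ngram (count_clip_ngram sentence references ngram)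

-- ===== LEMMAS AND PROOFS =====

-- the canonical ngram list: windows of length k joined with " "
def pvW (t : List String) (k : Nat) : List String :=
  (List.range (t.length + 1 - k)).map (fun i => PySem.Str.join " " ((t.drop i).take k))

theorem pvRow_eq (t : List String) (k : Nat) (hk : k ≤ t.length) :
    (List.range k).map (fun j => (t.drop j).headD "") = t.take k := by
  apply List.ext_getElem
  · simp [hk]
  · intro i h1 h2
    simp only [List.getElem_map, List.getElem_range, List.getElem_take]
    have hi : i < t.length := by simp at h1; omega
    rw [List.drop_eq_getElem_cons hi]
    simp [List.getElem?_eq_getElem hi]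

theorem pvZipWindows (k : Nat) (hk : 1 ≤ k) : ∀ (t : List String),
    pyZipRows ((List.range k).map (fun j => t.drop j)) =
      (List.range (t.length + 1 - k)).map (fun i => (t.drop i).take k) := by
  intro t
  induction t with
  | nil =>
    rw [pyZipRows]
    have : 1 - k = 0 := by omega
    simp [this]
  | cons a t' ih =>
    by_cases hlen : t'.length + 1 < k
    · rw [pyZipRows]
      have h0 : t'.length + 1 + 1 - k = 0 := by omega
      simp only [List.length_cons, h0, List.range_zero, List.map_nil]
      have hcond : (List.range k).map (fun j => (a :: t').drop j) = [] ∨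
          ((List.range k).map (fun j => (a :: t').drop j)).any List.isEmpty = true := by
        right
        refine List.any_eq_true.mpr ⟨(a :: t').drop (k-1), List.mem_map.mpr ⟨k-1, by simp; omega, rfl⟩, ?_⟩
        simp [List.isEmpty_iff, List.drop_eq_nil_iff]
        omega
      rw [dif_pos hcond]
    · have hk2 : k ≤ t'.length + 1 := by omega
      have hcond : ¬ ((List.range k).map (fun j => (a :: t').drop j) = [] ∨
          ((List.range k).map (fun j => (a :: t').drop j)).any List.isEmpty = true) := by
        simp only [not_or]
        constructor
        · intro hnil
          have := congrArg List.length hnil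
          simp at this
          omega
        · simp only [List.any_eq_true, not_exists]
          rintro l ⟨hl, hemp⟩
          rcases List.mem_map.mp hl with ⟨j, hj, rfl⟩
          simp only [List.mem_range] at hj
          simp only [List.isEmpty_iff, List.drop_eq_nil_iff, List.length_cons] at hemp
          omega
      rw [pyZipRows, dif_neg hcond]
      · have hmaps : ((List.range k).map (fun j => (a :: t').drop j)).map List.tail
            = (List.range k).map (fun j => t'.drop j) := by
          simp only [List.map_map]
          apply List.map_congr_left
          intro j hj
          simp only [Function.comp_apply, List.tail_drop, List.drop_succ_cons]
        rw [hmaps, ih]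
        have hsucc : (a :: t').length + 1 - k = (t'.length + 1 - k) + 1 := by
          simp only [List.length_cons]; omega
        rw [hsucc, List.range_succ_eq_map, List.map_cons]
        simp only [List.map_map, Function.comp_def, List.drop_succ_cons, List.drop_zero]
        congr 1
        exact pvRow_eq (a :: t') k (by simpa using hk2)

theorem pvFoldA_keys (c : String → Int) : ∀ (ys : List String) (d : PySem.Dict String Int),
    (ys.foldl (fun d g => if d.contains g then d else d.insert g (c g)) d).keys
      = ys.foldl (fun s g => if s.contains g then s else s ++ [g]) d.keys := by
  intro ys
  induction ys with
  | nil => intro d; rfl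
  | cons y ys ih =>
    intro d
    simp only [List.foldl_cons]
    have hc : d.keys.contains y = d.contains y := by
      rw [PySem.Dict.contains_eq_decide_mem_keys]
      simp [List.contains_iff_mem]
    rw [hc]
    by_cases h : d.contains y = true
    · rw [if_pos h, if_pos h, ih]
    · rw [if_neg h, if_neg h, ih,
        PySem.Dict.keys_insert_of_not_contains d (c y) (Bool.eq_false_iff.mpr h)]

theorem pvFoldA_getD (c : String → Int) : ∀ (ys : List String) (d : PySem.Dict String Int) (g : String),
    (ys.foldl (fun d g => if d.contains g then d else d.insert g (c g)) d).getD g 0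
      = if d.contains g then d.getD g 0 else if g ∈ ys then c g else 0 := by
  intro ys
  induction ys with
  | nil =>
    intro d g
    by_cases h : d.contains g = true
    · simp [h]
    · simp only [List.foldl_nil, h, List.not_mem_nil, if_false]
      exact PySem.Dict.getD_of_not_contains d (k := g) 0 (Bool.eq_false_iff.mpr h)
  | cons y ys ih =>
    intro d g
    simp only [List.foldl_cons]
    by_cases hy : d.contains y = true
    · rw [if_pos hy, ih]
      by_cases hg : d.contains g = true
      · simp [hg]
      · have hne : g ≠ y := fun he => hg (he ▸ hy)
        simp [hg, hne]
    · rw [if_neg hy]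
      rw [ih]
      by_cases he : g = y
      · subst he
        simp [PySem.Dict.contains_insert, PySem.Dict.getD_insert_self, hy,
          PySem.Dict.getD_of_not_contains d 0 (Bool.eq_false_iff.mpr hy)]
      · have h1 : (d.insert y (c y)).contains g = d.contains g := by
          simp [PySem.Dict.contains_insert, he]
        have h2 : (d.insert y (c y)).getD g 0 = d.getD g 0 :=
          PySem.Dict.getD_insert_of_ne d (c y) 0 he
        rw [h2, h1]
        simp [he]

-- items of a dedup-insert fold: one pair per first occurrence, value v g
theorem pvDedupFold_items (v : String → Int) (xs : List String) :
    (xs.foldl (fun d g => if d.contains g then d else d.insert g (v g)) PySem.Dict.empty).items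
      = (PySem.Set.ofList xs).map (fun g => (g, v g)) := by
  have hkeys : (xs.foldl (fun d g => if d.contains g then d else d.insert g (v g)) PySem.Dict.empty).keys
      = PySem.Set.ofList xs := by
    rw [pvFoldA_keys]; rfl
  have hnodup : (xs.foldl (fun d g => if d.contains g then d else d.insert g (v g)) PySem.Dict.empty).keys.Nodup := by
    rw [hkeys]; exact PySem.Set.nodup_ofList xs
  rw [PySem.Dict.items_eq_map_keys _ hnodup 0, hkeys]
  apply List.map_congr_left
  intro g hg
  rw [pvFoldA_getD]
  simp [PySem.Dict.contains_empty, (PySem.Set.mem_ofList xs g).mp hg]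

theorem pvCounterA_eq (xs : List String) :
    xs.foldl (fun d g => if d.contains g then d else d.insert g ((xs.count g : Int))) PySem.Dict.empty
      = PySem.Dict.counter xs := by
  apply PySem.Dict.ext
  rw [pvDedupFold_items (fun g => (xs.count g : Int)) xs, PySem.Dict.items_counter]

theorem pvInner_getD (rc : PySem.Dict String Int) :
    ∀ (ks : List String) (cl : PySem.Dict String Int) (g : String),
    0 ≤ rc.getD g 0 → 0 ≤ cl.getD g 0 →
    (ks.foldl (fun cl g =>
      if cl.contains g then cl.insert g (max (rc.getD g 0) (cl.getD g 0))
      else cl.insert g (rc.getD g 0)) cl).getD g 0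
      = if g ∈ ks then max (rc.getD g 0) (cl.getD g 0) else cl.getD g 0 := by
  intro ks
  induction ks with
  | nil => intro cl g _ _; simp
  | cons y ks ih =>
    intro cl g hr hcl
    simp only [List.foldl_cons]
    by_cases he : g = y
    · subst he
      have hstep : ((if cl.contains g then cl.insert g (max (rc.getD g 0) (cl.getD g 0))
          else cl.insert g (rc.getD g 0))).getD g 0 = max (rc.getD g 0) (cl.getD g 0) := by
        by_cases h : cl.contains g = true
        · rw [if_pos h, PySem.Dict.getD_insert_self]
        · rw [if_neg h, PySem.Dict.getD_insert_self,
            PySem.Dict.getD_of_not_contains cl (k := g) 0 (Bool.eq_false_iff.mpr h)]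
          omega
      rw [ih _ g hr (by rw [hstep]; omega), hstep]
      by_cases hm : g ∈ ks <;> simp [hm]
    · have hstep : ((if cl.contains y then cl.insert y (max (rc.getD y 0) (cl.getD y 0))
          else cl.insert y (rc.getD y 0))).getD g 0 = cl.getD g 0 := by
        by_cases h : cl.contains y = true
        · rw [if_pos h, PySem.Dict.getD_insert_of_ne _ _ _ he]
        · rw [if_neg h, PySem.Dict.getD_insert_of_ne _ _ _ he]
      rw [ih _ g hr (by rw [hstep]; exact hcl), hstep]
      simp [he]

theorem pvInner_counter (rc : PySem.Dict String Int) (cl : PySem.Dict String Int) (g : String)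
    (hnn : ∀ x, 0 ≤ rc.getD x 0) (hcl : 0 ≤ cl.getD g 0) :
    (rc.keys.foldl (fun cl g =>
      if cl.contains g then cl.insert g (max (rc.getD g 0) (cl.getD g 0))
      else cl.insert g (rc.getD g 0)) cl).getD g 0
      = max (cl.getD g 0) (rc.getD g 0) := by
  rw [pvInner_getD rc rc.keys cl g (hnn g) hcl]
  by_cases hm : g ∈ rc.keys
  · simp [hm, max_comm]
  · have : rc.contains g = false := by
      rw [Bool.eq_false_iff]
      intro hc
      exact hm ((PySem.Dict.contains_iff_mem_keys rc g).mp hc)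
    rw [PySem.Dict.getD_of_not_contains rc (k := g) 0 this]
    simp [hm]
    omega

theorem pvOuter_getD (ctr : List String → PySem.Dict String Int)
    (hnn : ∀ r x, 0 ≤ (ctr r).getD x 0) :
    ∀ (rs : List (List String)) (cl : PySem.Dict String Int) (g : String),
    0 ≤ cl.getD g 0 →
    (rs.foldl (fun cl r =>
      ((ctr r).keys.foldl (fun cl g =>
        if cl.contains g then cl.insert g (max ((ctr r).getD g 0) (cl.getD g 0))
        else cl.insert g ((ctr r).getD g 0)) cl)) cl).getD g 0
      = rs.foldl (fun m r => max m ((ctr r).getD g 0)) (cl.getD g 0) := by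
  intro rs
  induction rs with
  | nil => intro cl g _; rfl
  | cons r rs ih =>
    intro cl g hcl
    simp only [List.foldl_cons]
    rw [ih _ g (by rw [pvInner_counter (ctr r) cl g (hnn r) hcl]; omega),
      pvInner_counter (ctr r) cl g (hnn r) hcl]

theorem pvCount_ngram_eq (n : Int) (k : Nat) (hn : n = (k : Int)) (hk : 1 ≤ k) :
    ∀ (t : List String), count_ngram t n = PySem.Dict.counter (pvW t k) := by
  intro t
  have hslices : (PySem.List.pyRange 0 n 1).map (fun i => PySem.List.slice t (some i) none)
      = (List.range k).map (fun j => t.drop j) := by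
    rw [hn, PySem.List.pyRange_one]
    have : ((k : Int) - 0).toNat = k := by omega
    rw [this, List.map_map]
    apply List.map_congr_left
    intro j _
    simp only [Function.comp_apply, zero_add]
    exact PySem.List.slice_from_natCast t j
  have hng : (pyZipRows ((PySem.List.pyRange 0 n 1).map (fun i => PySem.List.slice t (some i) none))).map
      (fun token => PySem.Str.join " " token) = pvW t k := by
    rw [hslices, pvZipWindows k hk t, List.map_map]
    rfl
  show ((pyZipRows ((PySem.List.pyRange 0 n 1).map (fun i => PySem.List.slice t (some i) none))).map
      (fun token => PySem.Str.join " " token)).foldl _ PySem.Dict.empty = _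
  rw [hng]
  exact pvCounterA_eq (pvW t k)

theorem pvCgNgrams_eq (n : Int) (k : Nat) (hn : n = (k : Int)) (w : List String) :
    cgNgrams n w = pvW w k := by
  show (PySem.List.pyRange 0 ((w.length : Int) - n + 1) 1).map _ = _
  rw [PySem.List.pyRange_one]
  have h0 : ((w.length : Int) - n + 1 - 0).toNat = w.length + 1 - k := by omega
  rw [h0, List.map_map, pvW]
  apply List.map_congr_left
  intro i _
  simp only [Function.comp_apply]
  have hsl : PySem.List.slice w (some (0 + (i : Int))) (some (0 + (i : Int) + n)) = (w.drop i).take k := by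
    rw [hn]
    have h1 : (0 : Int) + (i : Int) = ((i : Nat) : Int) := by omega
    have h2 : (0 : Int) + (i : Int) + (k : Int) = ((i : Nat) : Int) + ((k : Nat) : Int) := by omega
    rw [h2, h1]
    exact PySem.List.slice_natCast_add w i k
  rw [hsl]

-- ===== VERDICT (by name: the statement is the Claim_ definition above) =====
theorem count_clip_ngram_spec : Claim_equal_count_clip_ngram := by
  intro sentence references ngram _
  show count_clip_ngram sentence references ngram = count_clip_ngram_alt sentence references ngram
  by_cases hn : ngram < 1
  · have hA : count_ngram sentence ngram = PySem.Dict.empty := by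
      show ((pyZipRows ((PySem.List.pyRange 0 ngram 1).map _)).map _).foldl _ PySem.Dict.empty = _
      rw [PySem.List.pyRange_one_eq_nil (by omega : ngram ≤ 0)]
      rw [List.map_nil, pyZipRows]
      simp
    show ((count_ngram sentence ngram).keys.foldl _ PySem.Dict.empty).items = _
    rw [hA, PySem.Dict.keys_empty, List.foldl_nil, count_clip_ngram_alt, if_pos hn]
    rfl
  · set k := ngram.toNat with hkdef
    have hk : 1 ≤ k := by omega
    have hnk : ngram = (k : Int) := by omega
    have hctr_nn : ∀ (r : List String) (x : String), 0 ≤ (PySem.Dict.counter (pvW r k)).getD x 0 := by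
      intro r x
      rw [PySem.Dict.getD_counter]
      exact Int.natCast_nonneg _
    have hclip : ∀ g : String,
        (references.foldl (fun clipped reference =>
          let rc := count_ngram reference ngram
          rc.keys.foldl (fun cl g =>
            if cl.contains g then cl.insert g (max (rc.getD g 0) (cl.getD g 0))
            else cl.insert g (rc.getD g 0)) clipped) PySem.Dict.empty).getD g 0
        = references.foldl (fun m r => max m (((pvW r k).count g : Int))) 0 := by
      intro g
      have hbody : (fun (clipped : PySem.Dict String Int) (reference : List String) =>
          let rc := count_ngram reference ngram
          rc.keys.foldl (fun cl g =>
            if cl.contains g then cl.insert g (max (rc.getD g 0) (cl.getD g 0))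
            else cl.insert g (rc.getD g 0)) clipped)
          = (fun (cl : PySem.Dict String Int) (r : List String) =>
            ((PySem.Dict.counter (pvW r k)).keys.foldl (fun cl g =>
              if cl.contains g then cl.insert g (max ((PySem.Dict.counter (pvW r k)).getD g 0) (cl.getD g 0))
              else cl.insert g ((PySem.Dict.counter (pvW r k)).getD g 0)) cl)) := by
        funext cl r
        rw [pvCount_ngram_eq ngram k hnk hk r]
      rw [hbody,
        pvOuter_getD (fun r => PySem.Dict.counter (pvW r k)) hctr_nn
          references PySem.Dict.empty g (by rw [PySem.Dict.getD_empty])]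
      rw [PySem.Dict.getD_empty]
      apply PySem.List.foldl_congr_mem
      intro m r _
      rw [PySem.Dict.getD_counter]
    -- A side: items of the final fold over the sentence counter's keys
    show ((count_ngram sentence ngram).keys.foldl _ PySem.Dict.empty).items = _
    rw [pvCount_ngram_eq ngram k hnk hk sentence]
    rw [PySem.Dict.items_foldl_insert_fresh (PySem.Dict.counter (pvW sentence k)).keys
      (fun a => a) _ PySem.Dict.empty (fun a _ => PySem.Dict.contains_empty a)
      (by rw [List.map_id']; exact PySem.Dict.nodup_keys_counter _)]
    rw [show (PySem.Dict.empty : PySem.Dict String Int).items = [] from rfl, List.nil_append]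
    -- B side: items of the dedup fold over the sentence's ngram list
    rw [count_clip_ngram_alt, if_neg hn]
    show _ = ((cgNgrams ngram sentence).foldl _ PySem.Dict.empty).items
    rw [pvCgNgrams_eq ngram k hnk sentence]
    rw [pvDedupFold_items (fun g => min (((pvW sentence k).count g : Int))
      ((references.map (fun r => cgNgrams ngram r)).foldl (fun m rn => max m ((rn.count g : Int))) 0))
      (pvW sentence k)]
    rw [PySem.Dict.keys_counter]
    apply List.map_congr_left
    intro g hg
    rw [PySem.Dict.getD_counter, hclip g]
    have hrefs : (references.map (fun r => cgNgrams ngram r)).foldl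
        (fun m rn => max m ((rn.count g : Int))) 0
        = references.foldl (fun m r => max m (((pvW r k).count g : Int))) 0 := by
      rw [List.foldl_map]
      apply PySem.List.foldl_congr_mem
      intro m r _
      rw [pvCgNgrams_eq ngram k hnk r]
    rw [hrefs]
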